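-- pv_equiv track=rewrite | github.com/pritesh2804patel-creator/Rakshanetra- | modules/threat_mapper.py | map_threat_type
-- ===== SOURCE A (Python) =====
-- def map_threat_type(query):
--     query = query.lower()
--     if any(word in query for word in ["vpn", "proxy", "bypass", "circumvent"]):
--         return "Circumvention"
--     elif any(word in query for word in ["fake news", "rumor", "deepfake", "hoax"]):
--         return "Disinformation"
--     elif any(word in query for word in ["spy", "surveillance", "espionage", "tracking"]):
--         return "Surveillance"
--     elif any(word in query for word in ["attack", "bomb", "weapon", "malware", "hack"]):
--         return "Cyber Threat"
--     else:
--         return "Unclassified"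
-- ===== SOURCE B (Python) =====
-- # Exhaustive min-rank reduction over a flat keyword->priority map, instead of
-- # a short-circuit category cascade: scan every keyword once, keep the smallest
-- # matched priority, map it to its category name at the end.
-- _KEYWORD_RANK = {
--     "vpn": 0, "proxy": 0, "bypass": 0, "circumvent": 0,
--     "fake news": 1, "rumor": 1, "deepfake": 1, "hoax": 1,
--     "spy": 2, "surveillance": 2, "espionage": 2, "tracking": 2,
--     "attack": 3, "bomb": 3, "weapon": 3, "malware": 3, "hack": 3,
-- }
-- _RANK_NAME = {0: "Circumvention", 1: "Disinformation", 2: "Surveillance", 3: "Cyber Threat"}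
--
--
-- def map_threat_type(query):
--     q = query.lower()
--     best = 4
--     for word, rank in _KEYWORD_RANK.items():
--         if rank < best and word in q:
--             best = rank
--     return _RANK_NAME.get(best, "Unclassified")
-- ===== Notes on version B (the rewrite author's own statement) =====
-- stated objective: alternative
-- what changed: Replaces the ordered if/elif category cascade with an exhaustive min-reduction: one pass over a flat keyword-to-priority map keeping the smallest matched rank, which is then translated to a category name; correct because the first matching category equals the minimum priority among all matched keywords.
import Mathlib
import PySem

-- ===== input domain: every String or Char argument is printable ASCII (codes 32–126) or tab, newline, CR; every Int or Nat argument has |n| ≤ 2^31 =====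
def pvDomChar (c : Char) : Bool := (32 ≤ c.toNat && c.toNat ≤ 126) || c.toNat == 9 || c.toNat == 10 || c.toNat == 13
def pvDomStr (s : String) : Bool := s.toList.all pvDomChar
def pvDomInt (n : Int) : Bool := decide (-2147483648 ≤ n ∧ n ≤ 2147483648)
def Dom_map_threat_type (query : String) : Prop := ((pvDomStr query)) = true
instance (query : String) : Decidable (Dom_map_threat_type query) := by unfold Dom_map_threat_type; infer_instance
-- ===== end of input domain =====

-- B replaces A's if/elif cascade with an exhaustive min-rank reduction over a flat keyword->priority map (alternative decomposition; same cost).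

-- ===== PORT A =====
def map_threat_type (query : String) : String :=
  let q := PySem.Str.lower query
  if (["vpn", "proxy", "bypass", "circumvent"] : List String).any (fun w => PySem.Str.isIn w q) then
    "Circumvention"
  else if (["fake news", "rumor", "deepfake", "hoax"] : List String).any (fun w => PySem.Str.isIn w q) then
    "Disinformation"
  else if (["spy", "surveillance", "espionage", "tracking"] : List String).any (fun w => PySem.Str.isIn w q) then
    "Surveillance"
  else if (["attack", "bomb", "weapon", "malware", "hack"] : List String).any (fun w => PySem.Str.isIn w q) then
    "Cyber Threat"
  else
    "Unclassified"

-- ===== PORT B =====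
-- flat keyword -> priority map (_KEYWORD_RANK.items(), in insertion order)
def keywordRank : List (String × Int) :=
  [("vpn", 0), ("proxy", 0), ("bypass", 0), ("circumvent", 0),
   ("fake news", 1), ("rumor", 1), ("deepfake", 1), ("hoax", 1),
   ("spy", 2), ("surveillance", 2), ("espionage", 2), ("tracking", 2),
   ("attack", 3), ("bomb", 3), ("weapon", 3), ("malware", 3), ("hack", 3)]

def rankName : PySem.Dict Int String :=
  PySem.Dict.ofList [(0, "Circumvention"), (1, "Disinformation"), (2, "Surveillance"), (3, "Cyber Threat")]

def map_threat_type_alt (query : String) : String :=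
  let q := PySem.Str.lower query
  let best := keywordRank.foldl
    (fun best p => if decide (p.2 < best) && PySem.Str.isIn p.1 q then p.2 else best) 4
  PySem.Dict.getD rankName best "Unclassified"

-- ===== PRECONDITION & SPEC =====
def Spec_map_threat_type (query : String) (out : String) : Prop := out = map_threat_type_alt query
instance (query : String) (out : String) : Decidable (Spec_map_threat_type query out) := by unfold Spec_map_threat_type; infer_instance

-- ===== CLAIM =====
def Claim_equal_map_threat_type : Prop := ∀ (query : String), Dom_map_threat_type query → Spec_map_threat_type query (map_threat_type query)

-- ===== LEMMAS AND PROOFS =====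

-- folding B's min-rank step over a constant-rank group either lowers best to r (some keyword hit, r < best) or leaves it
lemma fold_group (q : String) (ws : List String) (r best : Int) :
    (ws.map (fun w => (w, r))).foldl
        (fun best p => if decide (p.2 < best) && PySem.Str.isIn p.1 q then p.2 else best) best
      = if r < best ∧ ws.any (fun w => PySem.Str.isIn w q) then r else best := by
  induction ws generalizing best with
  | nil => simp
  | cons w ws ih =>
    simp only [List.map_cons, List.foldl_cons, List.any_cons]
    by_cases hw : PySem.Str.isIn w q = true
    · by_cases hr : r < best
      · simp only [hw, hr, decide_true, Bool.and_true, if_true, ih]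
        simp
      · simp only [hw, hr, decide_false, Bool.false_and, ih]
        simp [hr]
    · simp only [Bool.not_eq_true] at hw
      simp only [hw, Bool.and_false, ih]
      simp

-- ===== VERDICT =====
theorem map_threat_type_spec : Claim_equal_map_threat_type := by
  intro query _
  unfold Spec_map_threat_type map_threat_type map_threat_type_alt
  have hsplit : keywordRank =
      ((["vpn", "proxy", "bypass", "circumvent"] : List String).map (fun w => (w, (0 : Int))))
      ++ ((["fake news", "rumor", "deepfake", "hoax"] : List String).map (fun w => (w, (1 : Int))))
      ++ ((["spy", "surveillance", "espionage", "tracking"] : List String).map (fun w => (w, (2 : Int))))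
      ++ ((["attack", "bomb", "weapon", "malware", "hack"] : List String).map (fun w => (w, (3 : Int)))) := rfl
  rw [hsplit]
  simp only [List.foldl_append, fold_group]
  set q := PySem.Str.lower query with hq
  rcases Bool.eq_false_or_eq_true ((["vpn", "proxy", "bypass", "circumvent"] : List String).any (fun w => PySem.Str.isIn w q)) with g1|g1 <;>
  rcases Bool.eq_false_or_eq_true ((["fake news", "rumor", "deepfake", "hoax"] : List String).any (fun w => PySem.Str.isIn w q)) with g2|g2 <;>
  rcases Bool.eq_false_or_eq_true ((["spy", "surveillance", "espionage", "tracking"] : List String).any (fun w => PySem.Str.isIn w q)) with g3|g3 <;>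
  rcases Bool.eq_false_or_eq_true ((["attack", "bomb", "weapon", "malware", "hack"] : List String).any (fun w => PySem.Str.isIn w q)) with g4|g4 <;>
    simp only [g1, g2, g3, g4] <;> decide
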